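-- pv_equiv track=rewrite | github.com/YupengHan/matmul_optimizer | scripts/graph.py | derive_semantic_delta_tags
-- ===== SOURCE A (Python) =====
-- from typing import Any, Dict, Iterable, List, Optional, Sequence
--
-- def derive_semantic_delta_tags(actual_code_regions: Sequence[str], build_status: str) -> List[str]:
--     tags: List[str] = ['single_direction_attempt']
--     for rel_path in actual_code_regions:
--         if rel_path.startswith('src/kernels/'):
--             tags.append('kernel_code')
--         elif rel_path == 'src/runner/main.cpp':
--             tags.append('runner_glue')
--         elif rel_path.startswith('include/'):
--             tags.append('interface_glue')
--         elif rel_path == 'CMakeLists.txt':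
--             tags.append('build_glue')
--         elif rel_path.startswith('scripts/'):
--             tags.append('workflow_glue')
--     if build_status == 'FAIL':
--         tags.append('build_failed')
--     seen: set[str] = set()
--     ordered: List[str] = []
--     for tag in tags:
--         if tag not in seen:
--             seen.add(tag)
--             ordered.append(tag)
--     return ordered
-- ===== SOURCE B (Python) =====
-- _RULES = (
--     ('starts', 'src/kernels/', 'kernel_code'),
--     ('equals', 'src/runner/main.cpp', 'runner_glue'),
--     ('starts', 'include/', 'interface_glue'),
--     ('equals', 'CMakeLists.txt', 'build_glue'),
--     ('starts', 'scripts/', 'workflow_glue'),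
-- )
--
--
-- def _tag_of(rel_path):
--     for kind, pattern, tag in _RULES:
--         if rel_path.startswith(pattern) if kind == 'starts' else rel_path == pattern:
--             return tag
--     return None
--
--
-- def derive_semantic_delta_tags(actual_code_regions, build_status):
--     # Build the deduplicated tag list back-to-front: walk the regions in
--     # reverse, prepending each region's tag and dropping its later duplicates.
--     deduped = []
--     for rel_path in reversed(actual_code_regions):
--         tag = _tag_of(rel_path)
--         if tag is not None:
--             deduped = [tag] + [t for t in deduped if t != tag]
--     tags = ['single_direction_attempt'] + deduped
--     if build_status == 'FAIL':
--         tags.append('build_failed')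
--     return tags
-- ===== Notes on version B (the rewrite author's own statement) =====
-- stated objective: alternative
-- what changed: B builds the deduplicated tag list back-to-front: it walks the regions in reverse, prepending each region's tag and filtering its later duplicates out of the accumulator (no seen set, no intermediate full tag list), with classification driven by a rule table instead of A's forward collection pass followed by a separate seen-set dedup pass.
import Mathlib
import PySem

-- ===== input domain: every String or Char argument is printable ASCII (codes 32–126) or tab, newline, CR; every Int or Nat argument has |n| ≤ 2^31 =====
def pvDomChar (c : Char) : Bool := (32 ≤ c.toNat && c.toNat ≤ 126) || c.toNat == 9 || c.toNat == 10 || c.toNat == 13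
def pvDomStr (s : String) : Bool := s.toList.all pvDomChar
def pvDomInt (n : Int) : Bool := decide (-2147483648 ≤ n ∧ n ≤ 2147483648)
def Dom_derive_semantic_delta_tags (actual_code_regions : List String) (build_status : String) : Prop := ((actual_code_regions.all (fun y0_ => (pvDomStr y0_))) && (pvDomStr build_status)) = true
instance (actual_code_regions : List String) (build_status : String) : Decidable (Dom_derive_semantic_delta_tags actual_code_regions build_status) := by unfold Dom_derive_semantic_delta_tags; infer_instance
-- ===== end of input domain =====

-- B builds the deduplicated tag list back-to-front (reverse walk, prepend + filter out later
-- duplicates, data-driven rule table) instead of A's forward collection pass plus seen-set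
-- dedup pass; objective: alternative (same cost, different algorithm shape).

-- ===== PORT A =====
def derive_semantic_delta_tags (actual_code_regions : List String) (build_status : String) : List String :=
  -- tags = ['single_direction_attempt']; for rel_path in …: append the matching tag (if any)
  let tags : List String :=
    actual_code_regions.foldl (fun tags rel_path =>
      if PySem.Str.startswith rel_path "src/kernels/" then tags ++ ["kernel_code"]
      else if rel_path == "src/runner/main.cpp" then tags ++ ["runner_glue"]
      else if PySem.Str.startswith rel_path "include/" then tags ++ ["interface_glue"]
      else if rel_path == "CMakeLists.txt" then tags ++ ["build_glue"]
      else if PySem.Str.startswith rel_path "scripts/" then tags ++ ["workflow_glue"]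
      else tags) ["single_direction_attempt"]
  let tags : List String := if build_status == "FAIL" then tags ++ ["build_failed"] else tags
  -- seen = set(); ordered = []; for tag in tags: if tag not in seen: seen.add(tag); ordered.append(tag)
  let st : PySem.Set String × List String :=
    tags.foldl (fun st tag =>
      if PySem.Set.contains st.1 tag then st
      else (PySem.Set.add st.1 tag, st.2 ++ [tag])) (PySem.Set.empty, [])
  st.2

-- ===== PORT B =====
-- _RULES: (kind, pattern, tag); kind true = 'starts', false = 'equals'
def pvRules : List (Bool × String × String) :=
  [(true, "src/kernels/", "kernel_code"),
   (false, "src/runner/main.cpp", "runner_glue"),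
   (true, "include/", "interface_glue"),
   (false, "CMakeLists.txt", "build_glue"),
   (true, "scripts/", "workflow_glue")]

-- _tag_of: for-loop over the rule table with early return -> fold with an Option accumulator
def pvTagOf (rel_path : String) : Option String :=
  pvRules.foldl (fun acc rule =>
    match acc with
    | some t => some t
    | none =>
        if (if rule.1 then PySem.Str.startswith rel_path rule.2.1 else rel_path == rule.2.1)
        then some rule.2.2 else none) none

def derive_semantic_delta_tags_alt (actual_code_regions : List String) (build_status : String) : List String :=
  -- deduped = []; for rel_path in reversed(regions): prepend tag, filter out its duplicates
  let deduped : List String :=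
    actual_code_regions.reverse.foldl (fun deduped rel_path =>
      match pvTagOf rel_path with
      | some tag => [tag] ++ deduped.filter (fun t => t != tag)
      | none => deduped) []
  let tags : List String := ["single_direction_attempt"] ++ deduped
  if build_status == "FAIL" then tags ++ ["build_failed"] else tags

-- ===== PRECONDITION & SPEC =====
def Spec_derive_semantic_delta_tags (actual_code_regions : List String) (build_status : String) (out : List String) : Prop := out = derive_semantic_delta_tags_alt actual_code_regions build_status
instance (actual_code_regions : List String) (build_status : String) (out : List String) : Decidable (Spec_derive_semantic_delta_tags actual_code_regions build_status out) := by unfold Spec_derive_semantic_delta_tags; infer_instance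

-- ===== CLAIM (what is proved, stated in full; the proofs are below) =====
def Claim_equal_derive_semantic_delta_tags : Prop := ∀ (actual_code_regions : List String) (build_status : String), Dom_derive_semantic_delta_tags actual_code_regions build_status → Spec_derive_semantic_delta_tags actual_code_regions build_status (derive_semantic_delta_tags actual_code_regions build_status)

-- ===== LEMMAS AND PROOFS =====

-- the branch chain A classifies with, as an Option-valued function
def pvClassify (rel_path : String) : Option String :=
  if PySem.Str.startswith rel_path "src/kernels/" then some "kernel_code"
  else if rel_path == "src/runner/main.cpp" then some "runner_glue"
  else if PySem.Str.startswith rel_path "include/" then some "interface_glue"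
  else if rel_path == "CMakeLists.txt" then some "build_glue"
  else if PySem.Str.startswith rel_path "scripts/" then some "workflow_glue"
  else none

-- B's rule-table lookup computes the same classification as A's branch chain
lemma pvTagOf_eq (r : String) : pvTagOf r = pvClassify r := by
  simp only [pvTagOf, pvRules, pvClassify, List.foldl]
  split_ifs <;> simp_all

-- A's dedup step
def pvStep (st : PySem.Set String × List String) (tag : String) : PySem.Set String × List String :=
  if PySem.Set.contains st.1 tag then st else (PySem.Set.add st.1 tag, st.2 ++ [tag])

-- first-occurrence dedup, as a structural recursion
def pvFo : List String → List String
  | [] => []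
  | t :: l => t :: (pvFo l).filter (fun x => x != t)

-- A's collection loop produces exactly the classified tags, in order
lemma pvA_collect (acr : List String) (init : List String) :
    acr.foldl (fun tags rel_path =>
      if PySem.Str.startswith rel_path "src/kernels/" then tags ++ ["kernel_code"]
      else if rel_path == "src/runner/main.cpp" then tags ++ ["runner_glue"]
      else if PySem.Str.startswith rel_path "include/" then tags ++ ["interface_glue"]
      else if rel_path == "CMakeLists.txt" then tags ++ ["build_glue"]
      else if PySem.Str.startswith rel_path "scripts/" then tags ++ ["workflow_glue"]
      else tags) init
    = init ++ acr.filterMap pvClassify := by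
  induction acr generalizing init with
  | nil => simp
  | cons r rs ih =>
      simp only [List.foldl_cons, List.filterMap_cons, ih, pvClassify]
      split_ifs <;> simp

-- B's reversed loop computes the first-occurrence dedup of the classified tags
lemma pvB_loop (acr : List String) :
    acr.reverse.foldl (fun deduped rel_path =>
      match pvTagOf rel_path with
      | some tag => [tag] ++ deduped.filter (fun t => t != tag)
      | none => deduped) []
    = pvFo (acr.filterMap pvClassify) := by
  rw [List.foldl_reverse]
  simp only [pvTagOf_eq, List.singleton_append]
  induction acr with
  | nil => rfl
  | cons r rs ih =>
      simp only [List.foldr_cons, List.filterMap_cons]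
      cases h : pvClassify r <;> simp [pvFo, ih]

-- pvFo only returns elements of its input
lemma pvFo_sub (l : List String) (x : String) (hx : x ∈ pvFo l) : x ∈ l := by
  induction l with
  | nil => simp [pvFo] at hx
  | cons t ts ih =>
      simp only [pvFo, List.mem_cons] at hx
      rcases hx with h | h
      · exact h ▸ List.mem_cons_self
      · exact List.mem_cons_of_mem _ (ih (List.mem_filter.1 h).1)

-- A's seen-set dedup loop, started with seen set s, appends the first-occurrence
-- dedup of the remaining tags filtered by the seen set
lemma pvA_dedup (l : List String) (s : PySem.Set String) (acc : List String) :
    (l.foldl pvStep (s, acc)).2 = acc ++ (pvFo l).filter (fun x => ! PySem.Set.contains s x) := by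
  induction l generalizing s acc with
  | nil => simp [pvFo]
  | cons t ts ih =>
      simp only [List.foldl_cons, pvStep, pvFo]
      by_cases h : t ∈ s
      · have hc : PySem.Set.contains s t = true := by simpa using h
        simp only [hc, if_true]
        rw [ih]
        congr 1
        rw [List.filter_cons_of_neg (by simp [h]), List.filter_filter]
        apply List.filter_congr
        intro x _
        by_cases hxs : x ∈ s
        · simp [hxs]
        · have hxt : x ≠ t := fun hx => hxs (hx ▸ h)
          simp [hxs, hxt]
      · have hc : PySem.Set.contains s t = false := by simpa using h
        simp only [hc, Bool.false_eq_true, if_false]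
        rw [ih]
        rw [List.filter_cons_of_pos (by simp [h]), List.filter_filter]
        simp only [List.append_assoc, List.singleton_append]
        congr 2
        apply List.filter_congr
        intro x _
        by_cases hxt : x = t
        · subst hxt
          have hm : x ∈ PySem.Set.add s x := by simp [PySem.Set.mem_add]
          simp [hm]
        · by_cases hxs : x ∈ s
          · have hm : x ∈ PySem.Set.add s t := (PySem.Set.mem_add _ _ _).2 (Or.inl hxs)
            simp [hm, hxs]
          · have hm : x ∉ PySem.Set.add s t := by
              intro hm'
              rcases (PySem.Set.mem_add _ _ _).1 hm' with h' | h'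
              · exact hxs h'
              · exact hxt h'
            simp [hm, hxs, hxt]

-- the seen set only ever holds the initial entries and processed tags
lemma pvSeen_sub (ts : List String) (st : PySem.Set String × List String) (x : String)
    (hx : x ∈ (ts.foldl pvStep st).1) : x ∈ st.1 ∨ x ∈ ts := by
  induction ts generalizing st with
  | nil => exact Or.inl hx
  | cons t ts ih =>
      simp only [List.foldl_cons, pvStep] at hx
      split_ifs at hx with h
      · rcases ih _ hx with h' | h'
        · exact Or.inl h'
        · exact Or.inr (List.mem_cons_of_mem _ h')
      · rcases ih _ hx with h' | h'
        · rcases (PySem.Set.mem_add _ _ _).1 h' with h'' | h''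
          · exact Or.inl h''
          · exact Or.inr (h'' ▸ List.mem_cons_self)
        · exact Or.inr (List.mem_cons_of_mem _ h')

-- a classification tag is never 'build_failed' nor 'single_direction_attempt'
lemma pvClassify_ne (r t : String) (h : pvClassify r = some t) :
    t ≠ "build_failed" ∧ t ≠ "single_direction_attempt" := by
  unfold pvClassify at h
  split_ifs at h <;>
    first
      | exact Option.noConfusion h
      | (injection h with h; subst h; exact ⟨by decide, by decide⟩)

theorem derive_semantic_delta_tags_spec : Claim_equal_derive_semantic_delta_tags := by
  intro acr bs _
  unfold Spec_derive_semantic_delta_tags derive_semantic_delta_tags derive_semantic_delta_tags_alt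
  simp only [pvA_collect, pvB_loop]
  rw [show (fun (st : PySem.Set String × List String) (tag : String) =>
        if PySem.Set.contains st.1 tag then st
        else (PySem.Set.add st.1 tag, st.2 ++ [tag])) = pvStep from rfl]
  set l := acr.filterMap pvClassify with hl
  -- the first step of A's dedup loop consumes 'single_direction_attempt'
  have hsda : ∀ x, x ∈ PySem.Set.add (PySem.Set.empty (α := String)) "single_direction_attempt" ↔
      x = "single_direction_attempt" := by
    intro x; simp [PySem.Set.empty]
  have hfilter : (pvFo l).filter
      (fun x => ! PySem.Set.contains (PySem.Set.add PySem.Set.empty "single_direction_attempt") x)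
      = pvFo l := by
    apply List.filter_eq_self.2
    intro x hx
    rcases List.mem_filterMap.1 (pvFo_sub _ _ hx) with ⟨r, _, hr⟩
    have := (pvClassify_ne r x hr).2
    simp [this]
  have hmain : (l.foldl pvStep
      (PySem.Set.add PySem.Set.empty "single_direction_attempt", ["single_direction_attempt"])).2
      = "single_direction_attempt" :: pvFo l := by
    rw [pvA_dedup, hfilter]; rfl
  have hbf : PySem.Set.contains ((l.foldl pvStep
      (PySem.Set.add PySem.Set.empty "single_direction_attempt", ["single_direction_attempt"])).1)
      "build_failed" = false := by
    rw [Bool.eq_false_iff]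
    intro hc
    rcases pvSeen_sub _ _ _ ((PySem.Set.contains_iff _ _).1 hc) with h | h
    · exact absurd ((hsda _).1 h) (by decide)
    · rcases List.mem_filterMap.1 h with ⟨r, _, hr⟩
      exact (pvClassify_ne r _ hr).1 rfl
  have hstart : pvStep (PySem.Set.empty, []) "single_direction_attempt"
      = (PySem.Set.add PySem.Set.empty "single_direction_attempt", ["single_direction_attempt"]) := by
    simp [pvStep, PySem.Set.empty]
  by_cases hfail : bs == "FAIL"
  · simp only [hfail, if_true]
    rw [List.foldl_append, List.foldl_append]
    simp only [List.foldl_cons, List.foldl_nil]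
    rw [hstart]
    show (pvStep (l.foldl pvStep _) "build_failed").2 = _
    simp only [pvStep, hbf, Bool.false_eq_true, if_false, hmain]
    simp
  · simp only [hfail, Bool.false_eq_true, if_false]
    rw [List.foldl_append, List.foldl_cons, List.foldl_nil, hstart, hmain]
    simp
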